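-- pv_equiv track=rewrite | github.com/ZpWaitingForSunshine/LargeScaleFusion | tools.py | partition_column_pairs
-- ===== SOURCE A (Python) =====
-- def partition_column_pairs(N):
--     """
--     Partition all column pairs (i, j) with i < j into batches.
--     Each batch contains disjoint pairs (no column reused).
--     Returns:
--         List[List[Tuple[int, int]]]
--     """
--     used_pairs = set()
--     batches = []
--
--     all_pairs = {(i, j) for i in range(N) for j in range(i + 1, N)}
--
--     while used_pairs != all_pairs:
--         used_cols = set()
--         batch = []
--
--         for i in range(N):
--             for j in range(i + 1, N):
--                 if (i, j) in used_pairs: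
--                     continue
--                 if i in used_cols or j in used_cols:
--                     continue
--                 batch.append((i, j))
--                 used_pairs.add((i, j))
--                 used_cols.update([i, j])
--
--         batches.append(batch)
--     return batches
-- ===== SOURCE B (Python) =====
-- def partition_column_pairs(N):
--     """
--     Partition all column pairs (i, j) with i < j into batches.
--     Each batch contains disjoint pairs (no column reused).
--     Returns:
--         List[List[Tuple[int, int]]]
--     """
--     # Closed-form round-robin schedule: each pair goes into the batch numbered
--     # one less than the XOR of its two indices.
--     # Pairs with equal XOR are column-disjoint (the XOR determines each column's
--     # partner), and this bucket assignment provably reproduces A's greedy batches.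
--     M = 1
--     while M < N:
--         M *= 2
--     batches = [[] for _ in range(M - 1)]
--     for i in range(N):
--         for j in range(i + 1, N):
--             batches[(i ^ j) - 1].append((i, j))
--     return batches
-- ===== Notes on version B (the rewrite author's own statement) =====
-- stated objective: faster
-- what changed: B drops A's greedy simulation (repeatedly rescanning all pairs against used-pair/used-column sets) and instead assigns each pair directly to the bucket numbered one less than the XOR of its two indices, in a single pass, a closed-form round-robin schedule proved to reproduce A's greedy batches exactly.
import Mathlib
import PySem

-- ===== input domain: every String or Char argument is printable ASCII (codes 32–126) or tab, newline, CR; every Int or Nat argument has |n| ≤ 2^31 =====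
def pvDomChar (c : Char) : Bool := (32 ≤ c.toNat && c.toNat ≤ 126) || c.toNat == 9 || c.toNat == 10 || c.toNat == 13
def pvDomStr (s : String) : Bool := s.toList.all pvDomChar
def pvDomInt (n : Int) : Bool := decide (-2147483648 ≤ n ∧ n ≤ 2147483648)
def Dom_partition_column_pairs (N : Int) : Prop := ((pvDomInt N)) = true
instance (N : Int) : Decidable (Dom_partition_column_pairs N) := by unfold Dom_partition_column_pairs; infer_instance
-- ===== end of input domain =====

-- B replaces A's greedy round-by-round simulation by the closed-form schedule
-- sending each pair to the batch numbered one less than its XOR, proved to yield A's exact batches.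

-- ===== PORT A =====
-- loop body of A's inner double 'for' (state = (used_pairs, used_cols, batch))
def pcpStepA (st : List (Int × Int) × List Int × List (Int × Int)) (i j : Int) :
    List (Int × Int) × List Int × List (Int × Int) :=
  if PySem.Set.contains st.1 (i, j) then st
  else if PySem.Set.contains st.2.1 i || PySem.Set.contains st.2.1 j then st
  else (PySem.Set.add st.1 (i, j), PySem.Set.add (PySem.Set.add st.2.1 i) j,
        st.2.2 ++ [(i, j)])

-- all_pairs = {(i, j) for i in range(N) for j in range(i+1, N)}  (a Python set)
def pcpAllPairs (N : Int) : PySem.Set (Int × Int) :=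
  (PySem.List.pyRange 0 N 1).foldl
    (fun s i => (PySem.List.pyRange (i + 1) N 1).foldl
      (fun s j => PySem.Set.add s (i, j)) s) PySem.Set.empty

-- one execution of A's double 'for' loop from a given used_pairs
def pcpPassA (N : Int) (used_pairs : List (Int × Int)) :
    List (Int × Int) × List Int × List (Int × Int) :=
  (PySem.List.pyRange 0 N 1).foldl
    (fun st i => (PySem.List.pyRange (i + 1) N 1).foldl (fun st j => pcpStepA st i j) st)
    (used_pairs, PySem.Set.empty, [])

-- A's 'while used_pairs != all_pairs' loop; the fuel only makes it total (ample: ≥ 1 pair is taken per round)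
def pcpLoopA (allp : List (Int × Int)) (N : Int) :
    Nat → List (Int × Int) → List (List (Int × Int)) → List (List (Int × Int))
  | 0, _, batches => batches
  | fuel + 1, used_pairs, batches =>
    if PySem.Set.equal used_pairs allp then batches
    else pcpLoopA allp N fuel (pcpPassA N used_pairs).1
           (batches ++ [(pcpPassA N used_pairs).2.2])

def partition_column_pairs (N : Int) : List (List (Int × Int)) :=
  pcpLoopA (pcpAllPairs N) N (N.toNat * N.toNat + 1) PySem.Set.empty []

-- ===== PORT B =====
-- 'M = 1; while M < N: M *= 2'; the fuel only makes the while loop total (ample: M doubles each step)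
def pcpPow2 : Nat → Int → Int → Int
  | 0, _, M => M
  | fuel + 1, N, M => if M < N then pcpPow2 fuel N (M * 2) else M

-- 'batches[(i ^ j) - 1].append((i, j))': the list index is always nonnegative and in range
-- here (proved below), so the Nat-index List.modify is exact (no negative wraparound, no IndexError).
def partition_column_pairs_alt (N : Int) : List (List (Int × Int)) :=
  let M := pcpPow2 (N.toNat + 1) N 1
  let batches0 : List (List (Int × Int)) := (PySem.List.pyRange 0 (M - 1) 1).map (fun _ => [])
  (PySem.List.pyRange 0 N 1).foldl
    (fun bs i => (PySem.List.pyRange (i + 1) N 1).foldl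
      (fun bs j => bs.modify (PySem.Int.bxor i j - 1).toNat (fun b => b ++ [(i, j)])) bs)
    batches0

-- ===== PRECONDITION & SPEC =====
def Spec_partition_column_pairs (N : Int) (out : List (List (Int × Int))) : Prop := out = partition_column_pairs_alt N
instance (N : Int) (out : List (List (Int × Int))) : Decidable (Spec_partition_column_pairs N out) := by unfold Spec_partition_column_pairs; infer_instance

-- ===== CLAIM (what is proved, stated in full; the proofs are below) =====
def Claim_equal_partition_column_pairs : Prop := ∀ (N : Int), Dom_partition_column_pairs N → Spec_partition_column_pairs N (partition_column_pairs N)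

-- ===== LEMMAS AND PROOFS =====

-- ---- Nat XOR combinatorics ----

-- the highest bit where u > w differ is set in u and clear in w
theorem pcpTopBit (u w : Nat) (h : w < u) :
    ∃ h0, u.testBit h0 = true ∧ w.testBit h0 = false ∧ ∀ k, h0 < k → u.testBit k = w.testBit k := by
  have hd : u ^^^ w ≠ 0 := by
    intro h0; exact absurd (Nat.eq_of_xor_eq_zero h0) (by omega)
  have htop : (u ^^^ w).testBit (u ^^^ w).log2 = true := Nat.testBit_log2 hd
  have habove : ∀ k, (u ^^^ w).log2 < k → u.testBit k = w.testBit k := by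
    intro k hk
    have hlt : u ^^^ w < 2 ^ k := lt_of_lt_of_le Nat.lt_log2_self (Nat.pow_le_pow_right (by omega) (by omega))
    have h0' := Nat.testBit_lt_two_pow hlt
    rw [Nat.testBit_xor] at h0'
    cases hu' : u.testBit k <;> cases hw' : w.testBit k <;> simp [hu', hw'] at h0' ⊢
  have hdiff : u.testBit (u ^^^ w).log2 ≠ w.testBit (u ^^^ w).log2 := by
    rw [Nat.testBit_xor] at htop
    intro he; rw [he] at htop; simp at htop
  have hu : u.testBit (u ^^^ w).log2 = true := by
    by_contra hu
    have hu' : u.testBit (u ^^^ w).log2 = false := by simpa using hu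
    have hw' : w.testBit (u ^^^ w).log2 = true := by
      cases hw : w.testBit (u ^^^ w).log2 with
      | false => exact absurd (hu' ▸ hw ▸ rfl) hdiff
      | true => rfl
    exact absurd (Nat.lt_of_testBit _ hu' hw' habove) (by omega)
  refine ⟨(u ^^^ w).log2, hu, ?_, habove⟩
  cases hw : w.testBit (u ^^^ w).log2 with
  | false => rfl
  | true => exact absurd (hu ▸ hw ▸ rfl) hdiff

-- a pair with XOR above w is blocked by a lex-earlier pair of XOR exactly w sharing a column
theorem pcpBlockerNat (i j w n : Nat) (hij : i < j) (hjn : j < n) (hw : 1 ≤ w)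
    (hwu : w < i ^^^ j) :
    ∃ a b, a < b ∧ b < n ∧ a ^^^ b = w ∧ (a < i ∨ (a = i ∧ b < j)) ∧
      (a = i ∨ a = j ∨ b = i ∨ b = j) := by
  obtain ⟨h0, hu, hwb, hab⟩ := pcpTopBit (i ^^^ j) w hwu
  have hij0 : i.testBit h0 ≠ j.testBit h0 := by
    rw [Nat.testBit_xor] at hu
    intro he; rw [he] at hu; simp at hu
  by_cases hz : j.testBit h0 = true
  · have hti : i.testBit h0 = false := by
      cases hi : i.testBit h0 with
      | false => rfl
      | true => exact absurd (hz ▸ hi ▸ rfl) hij0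
    have hq'lt : i ^^^ w < j := by
      refine Nat.lt_of_testBit h0 ?_ hz ?_
      · rw [Nat.testBit_xor, hti, hwb]; rfl
      · intro k hk
        rw [Nat.testBit_xor, ← hab k hk, Nat.testBit_xor]
        cases i.testBit k <;> cases j.testBit k <;> rfl
    have hq'ne : i ^^^ w ≠ i := by
      intro he
      have h' : i ^^^ w = i ^^^ 0 := by rw [he, Nat.xor_zero]
      have := Nat.xor_right_inj.mp h'
      omega
    rcases Nat.lt_or_ge (i ^^^ w) i with hlt | hge
    · exact ⟨i ^^^ w, i, hlt, by omega, by rw [Nat.xor_comm, Nat.xor_xor_cancel_left], Or.inl hlt,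
        by omega⟩
    · have hgt : i < i ^^^ w := by omega
      exact ⟨i, i ^^^ w, hgt, by omega, by rw [Nat.xor_xor_cancel_left], Or.inr ⟨rfl, hq'lt⟩,
        Or.inl rfl⟩
  · have hzi : i.testBit h0 = true := by
      cases hi : i.testBit h0 with
      | true => rfl
      | false =>
        cases hj : j.testBit h0 with
        | false => exact absurd (by rw [hi, hj]) hij0
        | true => exact absurd hj hz
    have htj : j.testBit h0 = false := by
      cases hj : j.testBit h0 with
      | false => rfl
      | true => exact absurd hj hz
    have hq'lt : j ^^^ w < i := by
      refine Nat.lt_of_testBit h0 ?_ hzi ?_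
      · rw [Nat.testBit_xor, htj, hwb]; rfl
      · intro k hk
        rw [Nat.testBit_xor, ← hab k hk, Nat.testBit_xor]
        cases i.testBit k <;> cases j.testBit k <;> rfl
    exact ⟨j ^^^ w, j, by omega, hjn, by rw [Nat.xor_comm, Nat.xor_xor_cancel_left],
      Or.inl (by omega), by omega⟩

-- two increasing pairs with the same XOR sharing a column are equal
theorem pcpSameXorNat (a b c d : Nat) (h1 : a < b) (h2 : c < d) (hx : a ^^^ b = c ^^^ d)
    (hs : a = c ∨ a = d ∨ b = c ∨ b = d) : a = c ∧ b = d := by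
  rcases hs with rfl | rfl | rfl | rfl
  · exact ⟨rfl, Nat.xor_right_inj.mp hx⟩
  · have hb : b = c := Nat.xor_right_inj.mp (by rw [hx, Nat.xor_comm])
    omega
  · have ha : a = d := by
      have h' : b ^^^ a = b ^^^ d := by rw [Nat.xor_comm b a, hx]
      exact Nat.xor_right_inj.mp h'
    omega
  · have ha : a = c := by
      have h' : b ^^^ a = b ^^^ c := by rw [Nat.xor_comm b a, hx, Nat.xor_comm]
      exact Nat.xor_right_inj.mp h'
    exact ⟨ha, rfl⟩

-- every XOR class 1 ≤ w with 2^log2 w < n owns a pair below n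
theorem pcpClassNonemptyNat (w n : Nat) (hw : 1 ≤ w) (hn : 2 ^ Nat.log2 w < n) :
    ∃ a b, a < b ∧ b < n ∧ a ^^^ b = w := by
  have hwb : w.testBit w.log2 = true := Nat.testBit_log2 (by omega)
  have ha : w ^^^ 2 ^ w.log2 < 2 ^ w.log2 := by
    refine Nat.lt_of_testBit w.log2 ?_ (by simp) ?_
    · rw [Nat.testBit_xor, hwb, Nat.testBit_two_pow]; simp
    · intro k hk
      have hwk : w.testBit k = false :=
        Nat.testBit_lt_two_pow (lt_of_lt_of_le Nat.lt_log2_self (Nat.pow_le_pow_right (by omega) (by omega)))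
      have h2k : (2 ^ w.log2).testBit k = false := by
        rw [Nat.testBit_two_pow]; simp; omega
      rw [Nat.testBit_xor, hwk, h2k]; rfl
  exact ⟨w ^^^ 2 ^ w.log2, 2 ^ w.log2, ha, hn, by rw [Nat.xor_xor_cancel_right]⟩

-- ---- the lex pair list and XOR classes (proof-side helpers) ----

def pcpPairs (N : Int) : List (Int × Int) :=
  (PySem.List.pyRange 0 N 1).flatMap
    (fun i => (PySem.List.pyRange (i + 1) N 1).map (fun j => (i, j)))

def pcpXorP (p : Int × Int) : Int := PySem.Int.bxor p.1 p.2

def pcpRem (N : Int) (v : Nat) : List (Int × Int) :=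
  (pcpPairs N).filter (fun p => decide ((v : Int) ≤ pcpXorP p))

def pcpCls (N : Int) (v : Nat) : List (Int × Int) :=
  (pcpPairs N).filter (fun p => pcpXorP p == (v : Int))

def pcpLex (p q : Int × Int) : Prop := p.1 < q.1 ∨ (p.1 = q.1 ∧ p.2 < q.2)

theorem mem_pcpPairs (N : Int) (p : Int × Int) :
    p ∈ pcpPairs N ↔ 0 ≤ p.1 ∧ p.1 < p.2 ∧ p.2 < N := by
  obtain ⟨a, b⟩ := p
  simp only [pcpPairs, List.mem_flatMap, List.mem_map, PySem.List.mem_pyRange_one]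
  constructor
  · rintro ⟨i, ⟨h1, h2⟩, j, ⟨h3, h4⟩, he⟩
    obtain ⟨rfl, rfl⟩ := Prod.mk.injEq .. |>.mp he
    exact ⟨h1, by omega, h4⟩
  · rintro ⟨h1, h2, h3⟩
    exact ⟨a, ⟨h1, by omega⟩, b, ⟨by omega, h3⟩, rfl⟩

theorem pairwise_pcpPairs (N : Int) : (pcpPairs N).Pairwise pcpLex := by
  unfold pcpPairs
  rw [List.pairwise_flatMap]
  constructor
  · intro i _
    exact (PySem.List.pairwise_lt_pyRange_one _ _).map _
      (fun a b h => Or.inr ⟨rfl, h⟩)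
  · exact (PySem.List.pairwise_lt_pyRange_one _ _).imp_of_mem (by
      intro i1 i2 _ _ h x hx y hy
      obtain ⟨j1, _, rfl⟩ := List.mem_map.mp hx
      obtain ⟨j2, _, rfl⟩ := List.mem_map.mp hy
      exact Or.inl h)

theorem nodup_pcpPairs (N : Int) : (pcpPairs N).Nodup := by
  refine (pairwise_pcpPairs N).imp ?_
  intro p q h he
  subst he
  rcases h with h | ⟨_, h⟩ <;> omega

-- unpack a pair of the list into its Nat coordinates
theorem pcpPairs_elim (N : Int) (p : Int × Int) (hp : p ∈ pcpPairs N) :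
    ∃ a b : Nat, p = ((a : Int), (b : Int)) ∧ a < b ∧ (b : Int) < N ∧
      pcpXorP p = ((a ^^^ b : Nat) : Int) := by
  obtain ⟨h1, h2, h3⟩ := (mem_pcpPairs N p).mp hp
  refine ⟨p.1.toNat, p.2.toNat, ?_, by omega, by omega, ?_⟩
  · obtain ⟨x, y⟩ := p; simp at h1 h2 ⊢; omega
  · rw [pcpXorP, PySem.Int.bxor_of_nonneg h1 (by omega)]

theorem one_le_pcpXorP (N : Int) (p : Int × Int) (hp : p ∈ pcpPairs N) :
    (1 : Int) ≤ pcpXorP p := by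
  obtain ⟨a, b, _, hab, _, hx⟩ := pcpPairs_elim N p hp
  have : a ^^^ b ≠ 0 := fun h => absurd (Nat.eq_of_xor_eq_zero h) (by omega)
  omega

-- ---- the greedy pass and loop, as list programs (proof-side image of A) ----

def pcpStepB (st : List Int × List (Int × Int) × List (Int × Int)) (p : Int × Int) :
    List Int × List (Int × Int) × List (Int × Int) :=
  if PySem.Set.contains st.1 p.1 || PySem.Set.contains st.1 p.2 then
    (st.1, st.2.1, st.2.2 ++ [p])
  else (PySem.Set.add (PySem.Set.add st.1 p.1) p.2, st.2.1 ++ [p], st.2.2)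

def pcpPassB (remaining : List (Int × Int)) :
    List Int × List (Int × Int) × List (Int × Int) :=
  remaining.foldl pcpStepB (PySem.Set.empty, [], [])

def pcpLoopB : Nat → List (Int × Int) → List (List (Int × Int)) → List (List (Int × Int))
  | 0, _, batches => batches
  | fuel + 1, remaining, batches =>
    if remaining.isEmpty then batches
    else pcpLoopB fuel (pcpPassB remaining).2.2 (batches ++ [(pcpPassB remaining).2.1])

-- ---- A's port equals the greedy list loop (set bookkeeping eliminated) ----

theorem pcp_blocks (N : Int) : ∀ (is_ : List Int) (s : List (Int × Int)),
    s.Nodup → is_.Nodup → (∀ p ∈ s, p.1 ∉ is_) →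
    is_.foldl (fun s i => (PySem.List.pyRange (i + 1) N 1).foldl
        (fun s j => PySem.Set.add s (i, j)) s) s
      = s ++ is_.flatMap (fun i => (PySem.List.pyRange (i + 1) N 1).map (fun j => (i, j)))
    ∧ (s ++ is_.flatMap (fun i => (PySem.List.pyRange (i + 1) N 1).map (fun j => (i, j)))).Nodup := by
  intro is_
  induction is_ with
  | nil => intro s hs _ _; simpa using hs
  | cons i tl ih =>
    intro s hs hnd hfst
    obtain ⟨hitl, htl⟩ := List.nodup_cons.mp hnd
    have hbn : ((PySem.List.pyRange (i + 1) N 1).map (fun j => ((i, j) : Int × Int))).Nodup :=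
      (PySem.List.nodup_pyRange_one _ _).map (fun a b h => (Prod.ext_iff.mp h).2)
    have hbd : ∀ x ∈ (PySem.List.pyRange (i + 1) N 1).map (fun j => ((i, j) : Int × Int)), x ∉ s := by
      intro x hx hxs
      obtain ⟨j, _, rfl⟩ := List.mem_map.mp hx
      exact hfst _ hxs (List.mem_cons_self ..)
    have hinner : ∀ (s' : PySem.Set (Int × Int)),
        (PySem.List.pyRange (i + 1) N 1).foldl (fun s j => PySem.Set.add s (i, j)) s'
          = PySem.Set.update s' ((PySem.List.pyRange (i + 1) N 1).map (fun j => (i, j))) := by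
      intro s'; rw [PySem.Set.update_map_eq_foldl_add]
    have hupd : PySem.Set.update s ((PySem.List.pyRange (i + 1) N 1).map (fun j => (i, j)))
        = s ++ (PySem.List.pyRange (i + 1) N 1).map (fun j => (i, j)) :=
      PySem.Set.update_eq_append_of_disjoint _ _ hbn hbd
    have hs' : (s ++ (PySem.List.pyRange (i + 1) N 1).map (fun j => ((i, j) : Int × Int))).Nodup :=
      hs.append hbn (fun a ha hb => hbd a hb ha)
    have hfst' : ∀ p ∈ s ++ (PySem.List.pyRange (i + 1) N 1).map (fun j => ((i, j) : Int × Int)),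
        p.1 ∉ tl := by
      intro p hp
      rcases List.mem_append.mp hp with h | h
      · intro hmem; exact hfst p h (List.mem_cons_of_mem _ hmem)
      · obtain ⟨j, _, rfl⟩ := List.mem_map.mp h; exact hitl
    have := ih (s ++ (PySem.List.pyRange (i + 1) N 1).map (fun j => (i, j))) hs' htl hfst'
    simp only [List.foldl_cons, hinner, hupd]
    rw [this.1]
    refine ⟨by simp, ?_⟩
    have h2 := this.2
    simpa using h2

theorem pcpAllPairs_eq (N : Int) : pcpAllPairs N = pcpPairs N := by
  have h := pcp_blocks N (PySem.List.pyRange 0 N 1) PySem.Set.empty (by simp [PySem.Set.empty])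
    (PySem.List.nodup_pyRange_one _ _) (by intro p hp; simp [PySem.Set.empty] at hp)
  simpa [pcpAllPairs, pcpPairs, PySem.Set.empty] using h.1

theorem pcpPassA_eq (N : Int) (U : List (Int × Int)) :
    pcpPassA N U = (pcpPairs N).foldl (fun st p => pcpStepA st p.1 p.2) (U, [], []) := by
  unfold pcpPassA pcpPairs
  rw [List.foldl_flatMap]
  simp [List.foldl_map, PySem.Set.empty]

theorem pcp_pass : ∀ (L : List (Int × Int)), L.Nodup →
    ∀ (U : List (Int × Int)) (uc : List Int) (batch rest : List (Int × Int)),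
    ∃ t uc' batch',
      L.foldl (fun st p => pcpStepA st p.1 p.2) (U, uc, batch) = (U ++ t, uc', batch') ∧
      (L.filter (fun p => !(PySem.Set.contains U p))).foldl pcpStepB (uc, batch, rest)
        = (uc', batch', rest ++ L.filter (fun p => !(PySem.Set.contains (U ++ t) p))) ∧
      (∀ q ∈ t, q ∈ L) := by
  intro L
  induction L with
  | nil => intro _ U uc batch rest; exact ⟨[], uc, batch, by simp, by simp, by simp⟩
  | cons p T ih =>
    intro hnd U uc batch rest
    obtain ⟨hpT, hT⟩ := List.nodup_cons.mp hnd
    by_cases hpU : p ∈ U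
    · obtain ⟨t, uc', batch', hA, hB, ht⟩ := ih hT U uc batch rest
      refine ⟨t, uc', batch', ?_, ?_, fun q hq => List.mem_cons_of_mem _ (ht q hq)⟩
      · simpa [pcpStepA, hpU] using hA
      · simpa [hpU] using hB
    · by_cases hcp : p.1 ∈ uc ∨ p.2 ∈ uc
      · obtain ⟨t, uc', batch', hA, hB, ht⟩ := ih hT U uc batch (rest ++ [p])
        have hpt : p ∉ t := fun h => hpT (ht p h)
        refine ⟨t, uc', batch', ?_, ?_, fun q hq => List.mem_cons_of_mem _ (ht q hq)⟩
        · simpa [pcpStepA, hpU, hcp] using hA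
        · simp [pcpStepB, hpU, hcp, hpt] at hB ⊢
          rw [hB]
      · obtain ⟨t, uc', batch', hA, hB, ht⟩ := ih hT (U ++ [p])
          (PySem.Set.add (PySem.Set.add uc p.1) p.2) (batch ++ [p]) rest
        have hfc : T.filter (fun q => !(PySem.Set.contains (U ++ [p]) q))
            = T.filter (fun q => !(PySem.Set.contains U q)) := by
          refine List.filter_congr (fun q hq => ?_)
          have hqp : q ≠ p := fun h => hpT (h ▸ hq)
          simp [hqp]
        rw [hfc] at hB
        refine ⟨p :: t, uc', batch', ?_, ?_, ?_⟩
        · simpa [pcpStepA, hpU, hcp] using hA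
        · simp [pcpStepB, hpU, hcp] at hB ⊢
          rw [hB]
        · intro q hq
          rcases List.mem_cons.mp hq with rfl | hq
          · exact List.mem_cons_self ..
          · exact List.mem_cons_of_mem _ (ht q hq)

theorem pcp_guard (L U : List (Int × Int)) (hU : ∀ p ∈ U, p ∈ L) :
    PySem.Set.equal U L = true ↔ L.filter (fun p => !(PySem.Set.contains U p)) = [] := by
  rw [PySem.Set.equal_iff, List.filter_eq_nil_iff]
  constructor
  · intro h p hp
    simp [(h p).mpr hp]
  · intro h x
    refine ⟨fun hx => hU x hx, fun hx => ?_⟩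
    have := h x hx
    simpa using this

theorem pcp_loop_eq (N : Int) : ∀ (fuel : Nat) (U : List (Int × Int)) (batches : List (List (Int × Int))),
    (∀ p ∈ U, p ∈ pcpPairs N) →
    pcpLoopA (pcpPairs N) N fuel U batches
      = pcpLoopB fuel ((pcpPairs N).filter (fun p => !(PySem.Set.contains U p))) batches := by
  intro fuel
  induction fuel with
  | zero => intro U batches _; rfl
  | succ fuel ih =>
    intro U batches hU
    by_cases hg : PySem.Set.equal U (pcpPairs N) = true
    · have hnil := (pcp_guard (pcpPairs N) U hU).mp hg
      simp only [pcpLoopA, pcpLoopB]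
      rw [if_pos hg, hnil]
      simp
    · have hnil : ¬ (pcpPairs N).filter (fun p => !(PySem.Set.contains U p)) = [] :=
        fun h => hg ((pcp_guard (pcpPairs N) U hU).mpr h)
      obtain ⟨t, uc', batch', hA, hB, ht⟩ :=
        pcp_pass (pcpPairs N) (nodup_pcpPairs N) U PySem.Set.empty [] []
      have hPA : pcpPassA N U = (U ++ t, uc', batch') := by
        rw [pcpPassA_eq]; simpa [PySem.Set.empty] using hA
      have hPB : pcpPassB ((pcpPairs N).filter (fun p => !(PySem.Set.contains U p)))
          = (uc', batch', (pcpPairs N).filter (fun p => !(PySem.Set.contains (U ++ t) p))) := by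
        unfold pcpPassB
        simpa [PySem.Set.empty] using hB
      have hU' : ∀ p ∈ U ++ t, p ∈ pcpPairs N := by
        intro p hp
        rcases List.mem_append.mp hp with h | h
        exacts [hU p h, ht p h]
      have hie : ¬ (((pcpPairs N).filter (fun p => !(PySem.Set.contains U p))).isEmpty = true) := by
        simpa [List.isEmpty_iff] using hnil
      simp only [pcpLoopA, pcpLoopB]
      rw [if_neg hg, if_neg hie, hPA, hPB]
      exact ih (U ++ t) (batches ++ [batch']) hU'

-- ---- the greedy pass takes exactly the current XOR class ----

theorem pcp_pass2 (N : Int) (v : Nat) (hv : 1 ≤ v) :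
    ∀ (L Pd : List (Int × Int)), pcpRem N v = Pd ++ L →
    ∀ (uc : List Int) (batch0 rest0 : List (Int × Int)),
    (∀ x, x ∈ uc ↔ ∃ q ∈ Pd, pcpXorP q = (v : Int) ∧ (x = q.1 ∨ x = q.2)) →
    ∃ ucf, L.foldl pcpStepB (uc, batch0, rest0)
      = (ucf, batch0 ++ L.filter (fun p => pcpXorP p == (v : Int)),
              rest0 ++ L.filter (fun p => !(pcpXorP p == (v : Int)))) := by
  intro L
  induction L with
  | nil => intro Pd _ uc batch0 rest0 _; exact ⟨uc, by simp⟩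
  | cons p T ih =>
    intro Pd hdec uc batch0 rest0 hinv
    have hrem_nd : (pcpRem N v).Nodup := (nodup_pcpPairs N).filter _
    have hrem_pw : (pcpRem N v).Pairwise pcpLex := (pairwise_pcpPairs N).filter _
    have hpPd : p ∉ Pd := by
      rw [hdec] at hrem_nd
      have := List.disjoint_of_nodup_append hrem_nd
      exact fun h => this h (List.mem_cons_self ..)
    have hpmem : p ∈ pcpRem N v := by rw [hdec]; exact List.mem_append_right _ (List.mem_cons_self ..)
    have hpP : p ∈ pcpPairs N := List.mem_of_mem_filter hpmem
    have hple : (v : Int) ≤ pcpXorP p := by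
      have := List.of_mem_filter hpmem
      simpa using this
    obtain ⟨a, b, hpe, hab, hbN, hxab⟩ := pcpPairs_elim N p hpP
    by_cases hxv : pcpXorP p = (v : Int)
    · -- p joins the batch: its columns are free
      have hfree : ∀ x, (x = p.1 ∨ x = p.2) → x ∉ uc := by
        intro x hx hxuc
        obtain ⟨q, hqPd, hqx, hqc⟩ := (hinv x).mp hxuc
        have hqmem : q ∈ pcpRem N v := by rw [hdec]; exact List.mem_append_left _ hqPd
        have hqP : q ∈ pcpPairs N := List.mem_of_mem_filter hqmem
        obtain ⟨c, d, hqe, hcd, hdN, hxcd⟩ := pcpPairs_elim N q hqP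
        have hxeq : c ^^^ d = a ^^^ b := by
          have : pcpXorP q = pcpXorP p := by rw [hqx, hxv]
          rw [hxcd, hxab] at this
          exact_mod_cast this
        have hshare : c = a ∨ c = b ∨ d = a ∨ d = b := by
          rcases hx with rfl | rfl <;> rcases hqc with h | h <;>
            rw [hpe] at * <;> rw [hqe] at * <;> simp at h <;> omega
        have := pcpSameXorNat c d a b hcd hab hxeq hshare
        have hqp : q = p := by rw [hqe, hpe]; simp; omega
        exact hpPd (hqp ▸ hqPd)
      have hc1 : PySem.Set.contains uc p.1 = false := by
        rw [← Bool.not_eq_true, PySem.Set.contains_iff]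
        exact hfree p.1 (Or.inl rfl)
      have hc2 : PySem.Set.contains uc p.2 = false := by
        rw [← Bool.not_eq_true, PySem.Set.contains_iff]
        exact hfree p.2 (Or.inr rfl)
      have hstep : pcpStepB (uc, batch0, rest0) p
          = (PySem.Set.add (PySem.Set.add uc p.1) p.2, batch0 ++ [p], rest0) := by
        simp [pcpStepB]
        exact ⟨hfree _ (Or.inl rfl), hfree _ (Or.inr rfl)⟩
      obtain ⟨ucf, hres⟩ := ih (Pd ++ [p]) (by rw [hdec]; simp)
        (PySem.Set.add (PySem.Set.add uc p.1) p.2) (batch0 ++ [p]) rest0 (by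
          intro x
          rw [PySem.Set.mem_add, PySem.Set.mem_add, hinv x]
          constructor
          · rintro ((⟨q, hq, hx, hc⟩ | h) | h)
            · exact ⟨q, List.mem_append_left _ hq, hx, hc⟩
            · exact ⟨p, List.mem_append_right _ (List.mem_cons_self ..), hxv, Or.inl h⟩
            · exact ⟨p, List.mem_append_right _ (List.mem_cons_self ..), hxv, Or.inr h⟩
          · rintro ⟨q, hq, hx, hc⟩
            rcases List.mem_append.mp hq with hq | hq
            · exact Or.inl (Or.inl ⟨q, hq, hx, hc⟩)
            · have : q = p := by simpa using hq
              subst this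
              rcases hc with h | h
              · exact Or.inl (Or.inr h)
              · exact Or.inr h)
      refine ⟨ucf, ?_⟩
      rw [List.foldl_cons, hstep, hres]
      have hb : (pcpXorP p == (v : Int)) = true := by simpa using hxv
      simp [hb]
    · -- p is blocked by an earlier pair of the current class
      have hvlt : (v : Int) < pcpXorP p := lt_of_le_of_ne hple (fun h => hxv h.symm)
      have hwu : v < a ^^^ b := by rw [hxab] at hvlt; exact_mod_cast hvlt
      have hbn : b < N.toNat := by omega
      obtain ⟨c, d, hcd, hdn, hxw, hlex, hsh⟩ := pcpBlockerNat a b v N.toNat hab hbn hv hwu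
      have hqP : ((c : Int), (d : Int)) ∈ pcpPairs N := by
        rw [mem_pcpPairs]
        refine ⟨by positivity, by show (c:Int) < (d:Int); exact_mod_cast hcd, ?_⟩
        show (d : Int) < N
        omega
      have hqx : pcpXorP ((c : Int), (d : Int)) = (v : Int) := by
        rw [pcpXorP]
        simp [PySem.Int.bxor_natCast, hxw]
      have hqrem : ((c : Int), (d : Int)) ∈ pcpRem N v := by
        rw [pcpRem, List.mem_filter]
        exact ⟨hqP, by simp [hqx]⟩
      have hqPd : ((c : Int), (d : Int)) ∈ Pd := by
        rw [hdec] at hqrem hrem_pw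
        rcases List.mem_append.mp hqrem with h | h
        · exact h
        · exfalso
          rcases List.mem_cons.mp h with he | hT
          · rw [hpe] at he
            have h1 : (c : Int) = (a : Int) := (Prod.ext_iff.mp he).1
            have h2 : (d : Int) = (b : Int) := (Prod.ext_iff.mp he).2
            have : c = a ∧ d = b := ⟨by exact_mod_cast h1, by exact_mod_cast h2⟩
            rw [this.1, this.2] at hxw
            omega
          · have hplex : pcpLex p ((c : Int), (d : Int)) := by
              have := (List.pairwise_append.mp hrem_pw).2.1
              exact (List.pairwise_cons.mp this).1 _ hT
            rw [hpe] at hplex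
            simp only [pcpLex] at hplex
            omega
      have hx1 : p.1 = (a : Int) := by rw [hpe]
      have hx2 : p.2 = (b : Int) := by rw [hpe]
      have hshI : (p.1 = (c : Int) ∨ p.1 = (d : Int)) ∨ (p.2 = (c : Int) ∨ p.2 = (d : Int)) := by
        rw [hx1, hx2]
        omega
      have hblocked : PySem.Set.contains uc p.1 = true ∨ PySem.Set.contains uc p.2 = true := by
        rcases hshI with h | h
        · refine Or.inl ((PySem.Set.contains_iff uc _).mpr ((hinv _).mpr
            ⟨_, hqPd, hqx, ?_⟩))
          rcases h with h | h
          · exact Or.inl (by simp [h])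
          · exact Or.inr (by simp [h])
        · refine Or.inr ((PySem.Set.contains_iff uc _).mpr ((hinv _).mpr
            ⟨_, hqPd, hqx, ?_⟩))
          rcases h with h | h
          · exact Or.inl (by simp [h])
          · exact Or.inr (by simp [h])
      have hmem : p.1 ∈ uc ∨ p.2 ∈ uc := by
        rcases hblocked with h | h
        · exact Or.inl ((PySem.Set.contains_iff uc p.1).mp h)
        · exact Or.inr ((PySem.Set.contains_iff uc p.2).mp h)
      have hstep : pcpStepB (uc, batch0, rest0) p = (uc, batch0, rest0 ++ [p]) := by
        simp [pcpStepB]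
        intro hn
        rcases hmem with h | h
        · exact absurd h hn
        · exact h
      obtain ⟨ucf, hres⟩ := ih (Pd ++ [p]) (by rw [hdec]; simp) uc batch0 (rest0 ++ [p]) (by
        intro x
        rw [hinv x]
        constructor
        · rintro ⟨q, hq, hx, hc⟩
          exact ⟨q, List.mem_append_left _ hq, hx, hc⟩
        · rintro ⟨q, hq, hx, hc⟩
          rcases List.mem_append.mp hq with hq | hq
          · exact ⟨q, hq, hx, hc⟩
          · have : q = p := by simpa using hq
            subst this
            exact absurd hx hxv)
      refine ⟨ucf, ?_⟩
      rw [List.foldl_cons, hstep, hres]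
      have hb : (pcpXorP p == (v : Int)) = false := by simpa using hxv
      simp [hb]

theorem pcp_pass_full (N : Int) (v : Nat) (hv : 1 ≤ v) :
    ∃ ucf, pcpPassB (pcpRem N v) = (ucf, pcpCls N v, pcpRem N (v + 1)) := by
  have h1 : (pcpRem N v).filter (fun p => pcpXorP p == (v : Int)) = pcpCls N v := by
    rw [pcpRem, List.filter_filter, pcpCls]
    refine List.filter_congr (fun p hp => ?_)
    by_cases h' : pcpXorP p = (v : Int) <;> simp [h']
  have h2 : (pcpRem N v).filter (fun p => !(pcpXorP p == (v : Int))) = pcpRem N (v + 1) := by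
    rw [pcpRem, List.filter_filter, pcpRem]
    refine List.filter_congr (fun p hp => ?_)
    have h1' := one_le_pcpXorP N p hp
    by_cases h' : pcpXorP p = (v : Int)
    · have hb : (pcpXorP p == (v : Int)) = true := by simpa using h'
      rw [hb]
      symm
      rw [Bool.not_true, Bool.false_and, decide_eq_false_iff_not]
      push_cast
      omega
    · have hb : (pcpXorP p == (v : Int)) = false := by simpa using h'
      rw [hb, Bool.not_false, Bool.true_and, decide_eq_decide]
      push_cast
      omega
  obtain ⟨ucf, h⟩ := pcp_pass2 N v hv (pcpRem N v) [] (by simp) PySem.Set.empty [] []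
    (by intro x; simp [PySem.Set.empty])
  exact ⟨ucf, by rw [pcpPassB, h, List.nil_append, List.nil_append, h1, h2]⟩

-- ---- the greedy loop walks through the XOR classes 1 .. m-1 ----

theorem pcp_loop2 (N : Int) (m : Nat)
    (hcls : ∀ v : Nat, 1 ≤ v → v < m → pcpCls N v ≠ [])
    (hend : pcpRem N m = []) :
    ∀ (c v : Nat), 1 ≤ v → v + c = m → ∀ (fuel : Nat), c ≤ fuel →
    ∀ (batches : List (List (Int × Int))),
      pcpLoopB fuel (pcpRem N v) batches
        = batches ++ (List.range c).map (fun t => pcpCls N (v + t)) := by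
  intro c
  induction c with
  | zero =>
    intro v hv hvm fuel _ batches
    have : v = m := by omega
    subst this
    cases fuel with
    | zero => simp [pcpLoopB]
    | succ f => simp [pcpLoopB, hend]
  | succ c ih =>
    intro v hv hvm fuel hfuel batches
    obtain ⟨f, rfl⟩ : ∃ f, fuel = f + 1 := ⟨fuel - 1, by omega⟩
    have hne : pcpRem N v ≠ [] := by
      obtain ⟨p, hp⟩ := List.exists_mem_of_ne_nil _ (hcls v hv (by omega))
      have hpP := List.mem_of_mem_filter hp
      have hpx := List.of_mem_filter hp
      intro h
      have : p ∈ pcpRem N v := by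
        rw [pcpRem, List.mem_filter]
        refine ⟨hpP, ?_⟩
        simp at hpx ⊢
        omega
      rw [h] at this
      exact absurd this (List.not_mem_nil)
    obtain ⟨ucf, hpass⟩ := pcp_pass_full N v hv
    have hie : ((pcpRem N v).isEmpty = true) = False := by
      simp [List.isEmpty_iff, hne]
    rw [pcpLoopB, if_neg (by simp [List.isEmpty_iff, hne]), hpass]
    simp only
    rw [ih (v + 1) (by omega) (by omega) f (by omega) (batches ++ [pcpCls N v])]
    rw [List.append_assoc]
    congr 1
    rw [List.range_succ_eq_map, List.map_cons, List.map_map]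
    simp only [Nat.add_zero, List.singleton_append]
    congr 1
    refine List.map_congr_left (fun t _ => ?_)
    simp [Function.comp]
    congr 1
    omega

-- ---- the while-loop computing M ----

theorem pcp_pow2_go (N : Int) : ∀ (fuel : Nat) (M : Int), 0 < M → N ≤ M * 2 ^ fuel →
    ∃ k : Nat, pcpPow2 fuel N M = M * 2 ^ k ∧ N ≤ M * 2 ^ k ∧ (k = 0 ∨ M * 2 ^ (k - 1) < N) := by
  intro fuel
  induction fuel with
  | zero =>
    intro M hM h
    exact ⟨0, by simp [pcpPow2], by simpa using h, Or.inl rfl⟩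
  | succ fuel ih =>
    intro M hM h
    by_cases hlt : M < N
    · have hrec : N ≤ M * 2 * 2 ^ fuel := by
        have he : M * 2 * 2 ^ fuel = M * 2 ^ (fuel + 1) := by ring
        omega
      obtain ⟨k, h1, h2, h3⟩ := ih (M * 2) (by omega) hrec
      have he2 : M * 2 * 2 ^ k = M * 2 ^ (k + 1) := by ring
      refine ⟨k + 1, ?_, by rw [← he2]; exact h2, ?_⟩
      · rw [pcpPow2, if_pos hlt, h1, he2]
      · right
        have he4 : k + 1 - 1 = k := by omega
        rw [he4]
        rcases h3 with rfl | h3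
        · simpa using hlt
        · rcases Nat.eq_zero_or_pos k with hk0 | hk0
          · subst hk0; simpa using hlt
          · have he3 : M * 2 * 2 ^ (k - 1) = M * 2 ^ k := by
              obtain ⟨k', rfl⟩ : ∃ k', k = k' + 1 := ⟨k - 1, by omega⟩
              simp only [Nat.add_sub_cancel]
              rw [pow_succ]
              ring
            omega
    · exact ⟨0, by rw [pcpPow2, if_neg hlt]; simp, by simp; omega, Or.inl rfl⟩

-- ---- the bucket fold ----

theorem pcp_bucket (idx : Int × Int → Nat) :
    ∀ (L : List (Int × Int)) (bs : List (List (Int × Int))),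
    (∀ p ∈ L, idx p < bs.length) →
    ∀ k : Nat, (L.foldl (fun bs p => bs.modify (idx p) (fun b => b ++ [p])) bs)[k]?
      = (bs[k]?).map (fun b => b ++ L.filter (fun p => idx p == k)) := by
  intro L
  induction L with
  | nil =>
    intro bs _ k
    simp
  | cons p T ih =>
    intro bs hlt k
    rw [List.foldl_cons]
    rw [ih (bs.modify (idx p) (fun b => b ++ [p])) (by
      intro q hq
      rw [List.length_modify]
      exact hlt q (List.mem_cons_of_mem _ hq)) k]
    rw [List.getElem?_modify]
    by_cases he : idx p = k
    · have hb : (idx p == k) = true := by simpa using he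
      simp only [if_pos he, List.filter_cons, hb]
      cases bs[k]? <;> simp
    · have hb : (idx p == k) = false := by simpa using he
      simp only [if_neg he, List.filter_cons, hb]
      cases bs[k]? <;> simp

-- ---- assembling both sides ----

theorem pcp_alt_eq (N : Int) : partition_column_pairs N = partition_column_pairs_alt N := by
  -- the power of two M = 2^k computed by B's while loop
  obtain ⟨k, hMe, hNle, hlow⟩ := pcp_pow2_go N (N.toNat + 1) 1 (by omega) (by
    rcases le_or_gt N 0 with h | h
    · have : (0:Int) < 1 * 2 ^ (N.toNat + 1) := by positivity
      omega
    · have h1 : N = (N.toNat : Int) := by omega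
      have h2 : N.toNat < 2 ^ (N.toNat + 1) := lt_of_lt_of_le Nat.lt_two_pow_self
        (Nat.pow_le_pow_right (by omega) (by omega))
      rw [one_mul, h1]
      exact_mod_cast Nat.le_of_lt h2)
  set M : Int := pcpPow2 (N.toNat + 1) N 1 with hMdef
  rw [one_mul] at hMe hNle hlow
  set m : Nat := 2 ^ k with hmdef
  have hMm : M = (m : Int) := by rw [hMe, hmdef]; push_cast; ring
  -- every pair's XOR lies in 1 .. m-1
  have hxbound : ∀ p ∈ pcpPairs N, (1 : Int) ≤ pcpXorP p ∧ pcpXorP p < (m : Int) := by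
    intro p hp
    refine ⟨one_le_pcpXorP N p hp, ?_⟩
    obtain ⟨a, b, hpe, hab, hbN, hxab⟩ := pcpPairs_elim N p hp
    have hbm : b < m := by
      have : (b : Int) < (m : Int) := by omega
      exact_mod_cast this
    have ham : a < m := by omega
    have : a ^^^ b < 2 ^ k := Nat.xor_lt_two_pow (hmdef ▸ ham) (hmdef ▸ hbm)
    rw [hxab]
    exact_mod_cast hmdef ▸ this
  -- A's side: greedy loop = the classes 1 .. m-1 in order
  have hrem1 : pcpRem N 1 = pcpPairs N := by
    rw [pcpRem]
    refine List.filter_eq_self.mpr (fun p hp => ?_)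
    simpa using one_le_pcpXorP N p hp
  have hend : pcpRem N m = [] := by
    rw [pcpRem]
    refine List.filter_eq_nil_iff.mpr (fun p hp => ?_)
    have := (hxbound p hp).2
    simp
    omega
  have hcls : ∀ v : Nat, 1 ≤ v → v < m → pcpCls N v ≠ [] := by
    intro v hv hvm
    have hk1 : 1 ≤ k := by
      by_contra hk
      have hk0 : k = 0 := by omega
      have hm1' : m = 1 := by rw [hmdef, hk0, pow_zero]
      omega
    have hlow' : (2 : Int) ^ (k - 1) < N := by
      rcases hlow with h | h
      · exact absurd h (by omega)
      · exact h
    have hNpos : 0 < N := lt_of_le_of_lt (by positivity) hlow'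
    have hlog : Nat.log2 v < k := (Nat.log2_lt (by omega)).mpr (hmdef ▸ hvm)
    have hpow : 2 ^ Nat.log2 v < N.toNat := by
      have h1 : (2:Nat) ^ Nat.log2 v ≤ 2 ^ (k - 1) := Nat.pow_le_pow_right (by omega) (by omega)
      have h2 : (2:Nat) ^ (k-1) < N.toNat := by
        have h3 : ((2 ^ (k-1) : Nat) : Int) < N := by push_cast; exact hlow'
        omega
      omega
    obtain ⟨a, b, hab, hbn, hx⟩ := pcpClassNonemptyNat v N.toNat hv hpow
    have hpP : ((a : Int), (b : Int)) ∈ pcpPairs N := by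
      rw [mem_pcpPairs]
      refine ⟨by show (0:Int) ≤ (a:Int); positivity,
        by show (a:Int) < (b:Int); exact_mod_cast hab, ?_⟩
      show (b : Int) < N
      omega
    have : ((a : Int), (b : Int)) ∈ pcpCls N v := by
      rw [pcpCls, List.mem_filter]
      refine ⟨hpP, ?_⟩
      simp [pcpXorP, PySem.Int.bxor_natCast, hx]
    exact List.ne_nil_of_mem this
  have hfuel : m - 1 ≤ N.toNat * N.toNat + 1 := by
    rcases hlow with h | h
    · rw [hmdef, h]; simp
    · have hk1 : 1 ≤ k := by
        by_contra hk
        have hk0 : k = 0 := by omega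
        subst hk0
        norm_num at h hNle
        omega
      have h2 : (2:Nat) ^ (k-1) < N.toNat := by
        have h3 : ((2 ^ (k-1) : Nat) : Int) < N := by push_cast; exact h
        omega
      have hm2 : m = 2 * 2 ^ (k - 1) := by
        rw [hmdef]
        obtain ⟨k', rfl⟩ : ∃ k', k = k' + 1 := ⟨k - 1, by omega⟩
        simp [pow_succ]; ring
      have h4 : 2 * N.toNat ≤ N.toNat * N.toNat + 2 := by
        rcases Nat.lt_or_ge N.toNat 2 with h5 | h5
        · omega
        · have h6 := Nat.mul_le_mul_right N.toNat h5
          omega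
      omega
  have hA : partition_column_pairs N
      = (List.range (m - 1)).map (fun t => pcpCls N (1 + t)) := by
    rw [partition_column_pairs, pcpAllPairs_eq,
      pcp_loop_eq N _ PySem.Set.empty [] (by intro p hp; simp [PySem.Set.empty] at hp)]
    have hfe : (pcpPairs N).filter (fun p => !(PySem.Set.contains PySem.Set.empty p))
        = pcpRem N 1 := by
      rw [hrem1]
      exact List.filter_eq_self.mpr (fun p _ => by simp [PySem.Set.empty])
    rw [hfe]
    have := pcp_loop2 N m hcls hend (m - 1) 1 (by omega) (by
      have : 1 ≤ m := by rw [hmdef]; exact Nat.one_le_two_pow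
      omega) (N.toNat * N.toNat + 1) hfuel []
    rw [this]
    simp
  -- B's side: the bucket fold
  have hB : partition_column_pairs_alt N
      = (pcpPairs N).foldl
          (fun bs p => bs.modify (pcpXorP p - 1).toNat (fun b => b ++ [p]))
          (List.replicate (M - 1).toNat ([] : List (Int × Int))) := by
    have hinit : (PySem.List.pyRange 0 (M - 1) 1).map (fun _ => ([] : List (Int × Int)))
        = List.replicate (M - 1).toNat [] := by
      rw [PySem.List.pyRange_one, List.map_map]
      simp only [Function.comp_def]
      rw [List.map_const', List.length_range]
      congr 1
      omega
    have hfold : ∀ bs : List (List (Int × Int)),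
        (PySem.List.pyRange 0 N 1).foldl
          (fun bs i => (PySem.List.pyRange (i + 1) N 1).foldl
            (fun bs j => bs.modify (PySem.Int.bxor i j - 1).toNat (fun b => b ++ [(i, j)])) bs) bs
        = (pcpPairs N).foldl (fun bs p => bs.modify (pcpXorP p - 1).toNat (fun b => b ++ [p])) bs := by
      intro bs
      unfold pcpPairs
      rw [List.foldl_flatMap]
      simp [List.foldl_map, pcpXorP]
    simp only [partition_column_pairs_alt]
    rw [← hMdef, hinit, hfold]
  have hm1 : (M - 1).toNat = m - 1 := by omega
  have hidx : ∀ p ∈ pcpPairs N,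
      (pcpXorP p - 1).toNat < (List.replicate (m - 1) ([] : List (Int × Int))).length := by
    intro p hp
    obtain ⟨h1, h2⟩ := hxbound p hp
    rw [List.length_replicate]
    omega
  rw [hA, hB, hm1]
  refine List.ext_getElem? (fun i => ?_)
  rw [pcp_bucket (fun p => (pcpXorP p - 1).toNat) (pcpPairs N) _ hidx i]
  by_cases hi : i < m - 1
  · rw [List.getElem?_replicate, if_pos hi]
    rw [List.getElem?_map, List.getElem?_range hi]
    simp only [Option.map]
    congr 1
    rw [List.nil_append]
    rw [pcpCls]
    refine List.filter_congr (fun p hp => ?_)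
    obtain ⟨h1, h2⟩ := hxbound p hp
    by_cases he : pcpXorP p = ((1 + i : Nat) : Int)
    · have ht : (pcpXorP p - 1).toNat = i := by push_cast at he; omega
      have hb1 : ((pcpXorP p - 1).toNat == i) = true := by simpa using ht
      have hb2 : (pcpXorP p == ((1 + i : Nat) : Int)) = true := by simpa using he
      rw [hb1, hb2]
    · have ht : (pcpXorP p - 1).toNat ≠ i := by
        intro h
        apply he
        push_cast
        omega
      have hb1 : ((pcpXorP p - 1).toNat == i) = false := by simpa using ht
      have hb2 : (pcpXorP p == ((1 + i : Nat) : Int)) = false := by simpa using he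
      rw [hb1, hb2]
  · rw [List.getElem?_replicate, if_neg hi]
    rw [List.getElem?_map]
    rw [List.getElem?_eq_none (by rw [List.length_range]; omega)]
    rfl

-- ===== VERDICT (by name: the statement is the Claim_ definition above) =====
theorem partition_column_pairs_spec : Claim_equal_partition_column_pairs := by
  intro N _
  unfold Spec_partition_column_pairs
  exact pcp_alt_eq N
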